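-- pv_equiv track=rewrite | github.com/ElizabethKaren/interview_practice_questions | easy_on_leet.py | shuffle_string
-- ===== SOURCE A (Python) =====
-- def shuffle_string(s, indices):
--     arr = [char for char in s]
--     index = 0
--     while index < len(indices)-1:
--         if indices[index] > indices[index+1]:
--             indices[index], indices[index+1] = indices[index+1], indices[index]
--             arr[index], arr[index +1] = arr[index+1], arr[index]
--             index = 0
--         else:
--             index += 1
--
--     return ''.join(arr)
-- ===== SOURCE B (Python) =====
-- def shuffle_string(s, indices):
--     order = sorted(range(len(indices)), key=lambda i: indices[i])
--     return ''.join(s[i] for i in order) + s[len(indices):]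
-- ===== Notes on version B (the rewrite author's own statement) =====
-- stated objective: faster
-- what changed: A rearranges by a restart-to-zero adjacent-swap (bubble) sort of the indices list, quadratic-plus; B computes the placement order in one stable sort of the positions keyed by indices and joins the characters once.
-- outside the precondition, e.g. on shuffle_string('a', [0, 1]): A returns 'a', B raises IndexError; on shuffle_string('ab', [1, 0, 2]): A returns 'ba', B raises IndexError
import Mathlib
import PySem

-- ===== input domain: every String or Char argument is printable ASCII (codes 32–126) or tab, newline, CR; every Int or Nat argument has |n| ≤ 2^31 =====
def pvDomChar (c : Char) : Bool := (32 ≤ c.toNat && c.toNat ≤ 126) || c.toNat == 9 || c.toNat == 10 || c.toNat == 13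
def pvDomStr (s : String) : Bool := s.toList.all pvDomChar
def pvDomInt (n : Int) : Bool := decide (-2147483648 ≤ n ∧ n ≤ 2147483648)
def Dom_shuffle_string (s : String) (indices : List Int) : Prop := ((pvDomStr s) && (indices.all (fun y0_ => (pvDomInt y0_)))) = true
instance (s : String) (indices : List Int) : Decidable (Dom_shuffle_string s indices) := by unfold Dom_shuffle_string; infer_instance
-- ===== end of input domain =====

-- B replaces A's restart-to-zero adjacent-swap (bubble) sort of the indices with one stable
-- sort of the positions keyed by the indices. Python A sorts `indices` IN PLACE (B does not);
-- the equivalence proved here is about the RETURN value only.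

-- ===== PORT A =====

-- swap of adjacent positions i, i+1 (the simultaneous assignment `l[i], l[i+1] = l[i+1], l[i]`;
-- exact whenever i+1 < l.length, which holds at every use inside Pre_)
def pvSwapAdj {α : Type} : List α → Nat → List α
  | x :: y :: t, 0 => y :: x :: t
  | x :: t, n + 1 => x :: pvSwapAdj t n
  | l, _ => l

-- number of inversions; termination measure for A's while loop
def pvInv : List Int → Nat
  | [] => 0
  | x :: t => t.countP (fun y => decide (y < x)) + pvInv t

theorem pvSwapAdj_perm {α : Type} : ∀ (l : List α) (i : Nat), (pvSwapAdj l i).Perm l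
  | [], _ => by simp [pvSwapAdj]
  | [x], i => by cases i <;> simp [pvSwapAdj]
  | x :: y :: t, 0 => by simpa [pvSwapAdj] using List.Perm.swap x y t
  | x :: y :: t, n + 1 => by
      simpa [pvSwapAdj] using (pvSwapAdj_perm (y :: t) n).cons x

theorem pvInv_swapAdj_lt : ∀ (l : List Int) (i : Nat), i + 1 < l.length →
    l.getD (i + 1) 0 < l.getD i 0 → pvInv (pvSwapAdj l i) < pvInv l
  | [], i, h, _ => by simp at h
  | [x], i, h, _ => by simp at h
  | x :: y :: t, 0, _, hlt => by
      have hxy : y < x := by simpa [List.getD] using hlt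
      have hnxy : ¬ (x < y) := by omega
      simp [pvSwapAdj, pvInv, hxy, hnxy]
      omega
  | x :: y :: t, n + 1, h, hlt => by
      have hrec : pvInv (pvSwapAdj (y :: t) n) < pvInv (y :: t) := by
        apply pvInv_swapAdj_lt (y :: t) n (by simpa using h)
        simpa [List.getD] using hlt
      have hcnt : (pvSwapAdj (y :: t) n).countP (fun z => decide (z < x))
          = (y :: t).countP (fun z => decide (z < x)) :=
        (pvSwapAdj_perm (y :: t) n).countP_eq _
      have key : (pvSwapAdj (y :: t) n).countP (fun z => decide (z < x)) + pvInv (pvSwapAdj (y :: t) n)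
          < (y :: t).countP (fun z => decide (z < x)) + pvInv (y :: t) := by rw [hcnt]; omega
      simpa only [pvSwapAdj, pvInv] using key

-- the while loop of A, on the pair of mutable lists (indices, arr) and the cursor `index`
def pvLoopA (ind : List Int) (arr : List Char) (index : Nat) : List Int × List Char :=
  if h : index + 1 < ind.length then
    if hgt : ind.getD (index + 1) 0 < ind.getD index 0 then
      pvLoopA (pvSwapAdj ind index) (pvSwapAdj arr index) 0
    else
      pvLoopA ind arr (index + 1)
  else (ind, arr)
termination_by (pvInv ind, ind.length - index)
decreasing_by
  · exact Prod.Lex.left _ _ (pvInv_swapAdj_lt ind index h hgt)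
  · exact Prod.Lex.right _ (by omega)

def shuffle_string (s : String) (indices : List Int) : String :=
  -- arr = [char for char in s]
  let arr := s.toList
  -- the while loop (index starts at 0); Python mutates `indices` and `arr` in place
  let res := pvLoopA indices arr 0
  -- return ''.join(arr)  (a join of single-character strings over the char list)
  String.ofList res.2

-- ===== PORT B =====

def shuffle_string_alt (s : String) (indices : List Int) : String :=
  -- order = sorted(range(len(indices)), key=lambda i: indices[i])
  -- (indices[i] ported as getD: every i drawn from range(len(indices)) is in range)
  let order := PySem.List.sorted (List.range indices.length) (fun i => indices.getD i 0) false
  -- return ''.join(s[i] for i in order) + s[len(indices):]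
  -- (s[i] ported as getD: exact under Pre_, where i < len(indices) ≤ len(s);
  --  the slice s[len(indices):] from a nonnegative index is List.drop)
  String.ofList (order.map (fun i => s.toList.getD i ' ') ++ s.toList.drop indices.length)

-- ===== PRECONDITION & SPEC =====
-- Pre_ requires len(indices) <= len(s): a string shorter than the indices list makes A raise
-- IndexError at the first swap that reaches past the string (and where no swap does, A's value
-- is an accident of the leftover tail), while B's own algorithm raises IndexError there.
def Pre_shuffle_string (s : String) (indices : List Int) : Prop :=
  indices.length ≤ s.toList.length
instance (s : String) (indices : List Int) : Decidable (Pre_shuffle_string s indices) := by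
  unfold Pre_shuffle_string; infer_instance

def pvWitness_shuffle_string : String × List Int := ("ba", [1, 0])

def Spec_shuffle_string (s : String) (indices : List Int) (out : String) : Prop := out = shuffle_string_alt s indices
instance (s : String) (indices : List Int) (out : String) : Decidable (Spec_shuffle_string s indices out) := by unfold Spec_shuffle_string; infer_instance

-- ===== CLAIM (what is proved, stated in full; the proofs are below) =====
def Claim_equal_shuffle_string : Prop := ∀ (s : String) (indices : List Int), Dom_shuffle_string s indices → Pre_shuffle_string s indices → Spec_shuffle_string s indices (shuffle_string s indices)

-- ===== LEMMAS AND PROOFS =====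

theorem pvSwapAdj_map {α β : Type} (f : α → β) :
    ∀ (l : List α) (i : Nat), (pvSwapAdj l i).map f = pvSwapAdj (l.map f) i
  | [], i => by simp [pvSwapAdj]
  | [x], i => by cases i <;> simp [pvSwapAdj]
  | x :: y :: t, 0 => by simp [pvSwapAdj]
  | x :: y :: t, n + 1 => by simpa [pvSwapAdj] using pvSwapAdj_map f (y :: t) n

theorem pvSwapAdj_zip {α β : Type} :
    ∀ (a : List α) (b : List β) (i : Nat), a.length = b.length →
    (pvSwapAdj a i).zip (pvSwapAdj b i) = pvSwapAdj (a.zip b) i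
  | [], b, i, h => by
      have hb : b = [] := List.length_eq_zero_iff.mp h.symm
      subst hb; simp [pvSwapAdj]
  | x :: t, [], i, h => by simp at h
  | [x], c :: u, i, h => by
      simp at h; subst h; cases i <;> simp [pvSwapAdj]
  | x :: y :: t, [c], i, h => by simp at h
  | x :: y :: t, c :: d :: u, 0, h => by simp [pvSwapAdj]
  | x :: y :: t, c :: d :: u, n + 1, h => by
      have := pvSwapAdj_zip (y :: t) (d :: u) n (by simpa using h)
      simpa [pvSwapAdj] using this

-- the sort order both programs realise on position-tagged keys: strictly by key, ties by position
def pvR (a b : Int × Nat) : Prop := a.1 < b.1 ∨ (a.1 = b.1 ∧ a.2 ≤ b.2)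

-- stability invariant: equal keys appear in increasing position order
def pvRst (a b : Int × Nat) : Prop := a.1 = b.1 → a.2 < b.2

-- A's loop on the list of (key, original position) pairs
def pvLoopP (ps : List (Int × Nat)) (index : Nat) : List (Int × Nat) :=
  if h : index + 1 < ps.length then
    if hgt : (ps.getD (index + 1) (0, 0)).1 < (ps.getD index (0, 0)).1 then
      pvLoopP (pvSwapAdj ps index) 0
    else
      pvLoopP ps (index + 1)
  else ps
termination_by (pvInv (ps.map Prod.fst), ps.length - index)
decreasing_by
  · refine Prod.Lex.left _ _ ?_
    rw [pvSwapAdj_map]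
    apply pvInv_swapAdj_lt _ _ (by simpa using h)
    have g1 : (ps.map Prod.fst).getD (index + 1) 0 = (ps.getD (index + 1) (0, 0)).1 := by
      rw [List.getD_eq_getElem?_getD, List.getD_eq_getElem?_getD, List.getElem?_map,
        List.getElem?_eq_getElem (by omega : index + 1 < ps.length)]
      simp
    have g2 : (ps.map Prod.fst).getD index 0 = (ps.getD index (0, 0)).1 := by
      rw [List.getD_eq_getElem?_getD, List.getD_eq_getElem?_getD, List.getElem?_map,
        List.getElem?_eq_getElem (by omega : index < ps.length)]
      simp
    rw [g1, g2]; exact hgt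
  · exact Prod.Lex.right _ (by omega)

theorem pvLoopP_perm (ps : List (Int × Nat)) (index : Nat) : (pvLoopP ps index).Perm ps := by
  fun_induction pvLoopP ps index with
  | case1 ps index h hgt ih => exact ih.trans (pvSwapAdj_perm ps index)
  | case2 ps index h hgt ih => exact ih
  | case3 ps index h => exact List.Perm.refl ps

theorem pvSwapAdj_length {α : Type} : ∀ (l : List α) (i : Nat), (pvSwapAdj l i).length = l.length
  | [], i => by simp [pvSwapAdj]
  | [x], i => by cases i <;> simp [pvSwapAdj]
  | x :: y :: t, 0 => by simp [pvSwapAdj]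
  | x :: y :: t, n + 1 => by simpa [pvSwapAdj] using pvSwapAdj_length (y :: t) n

theorem pvZip_getD_fst (a : List Int) (b : List Nat) (i : Nat)
    (hi : i < a.length) (h : a.length = b.length) :
    ((a.zip b).getD i (0, 0)).1 = a.getD i 0 := by
  have hz : i < (a.zip b).length := by simp [List.length_zip]; omega
  rw [List.getD_eq_getElem _ _ hz, List.getD_eq_getElem _ _ hi, List.getElem_zip]

theorem pvSwapAdj_append {α : Type} :
    ∀ (a b : List α) (i : Nat), i + 1 < a.length →
    pvSwapAdj (a ++ b) i = pvSwapAdj a i ++ b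
  | [], b, i, h => by simp at h
  | [x], b, i, h => by simp at h
  | x :: y :: t, b, 0, h => by simp [pvSwapAdj]
  | x :: y :: t, b, n + 1, h => by
      have := pvSwapAdj_append (y :: t) b n (by simpa using h)
      simpa [pvSwapAdj] using this

-- bridge: A's loop on (indices, arr), with arr the positions mapped through f followed by an
-- untouched tail, is the pair loop on (key, position) pairs
theorem pvLoopA_eq (f : Nat → Char) (ind : List Int) (arr : List Char) (index : Nat) :
    ∀ (pos : List Nat) (rest : List Char), arr = pos.map f ++ rest → ind.length = pos.length →
    pvLoopA ind arr index
      = ((pvLoopP (ind.zip pos) index).map Prod.fst,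
         (pvLoopP (ind.zip pos) index).map (fun p => f p.2) ++ rest) := by
  fun_induction pvLoopA ind arr index with
  | case1 ind arr index h hgt ih =>
    intro pos rest harr hlen
    subst harr
    have hzl : (ind.zip pos).length = ind.length := by simp [List.length_zip]; omega
    rw [pvLoopP]
    rw [dif_pos (by omega : index + 1 < (ind.zip pos).length)]
    rw [dif_pos (by
      rw [pvZip_getD_fst ind pos _ (by omega) hlen, pvZip_getD_fst ind pos _ (by omega) hlen]
      exact hgt)]
    have hsplit : pvSwapAdj (pos.map f ++ rest) index = pvSwapAdj (pos.map f) index ++ rest :=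
      pvSwapAdj_append _ _ _ (by rw [List.length_map]; omega)
    have hrec := ih (pvSwapAdj pos index) rest
      (by rw [hsplit, pvSwapAdj_map])
      (by rw [pvSwapAdj_length, pvSwapAdj_length]; exact hlen)
    rw [pvSwapAdj_zip ind pos index hlen] at hrec
    exact hrec
  | case2 ind arr index h hgt ih =>
    intro pos rest harr hlen
    have hzl : (ind.zip pos).length = ind.length := by simp [List.length_zip]; omega
    rw [pvLoopP]
    rw [dif_pos (by omega : index + 1 < (ind.zip pos).length)]
    rw [dif_neg (by
      rw [pvZip_getD_fst ind pos _ (by omega) hlen, pvZip_getD_fst ind pos _ (by omega) hlen]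
      exact hgt)]
    exact ih pos rest harr hlen
  | case3 ind arr index h =>
    intro pos rest harr hlen
    have hzl : (ind.zip pos).length = ind.length := by simp [List.length_zip]; omega
    rw [pvLoopP, dif_neg (by omega : ¬ (index + 1 < (ind.zip pos).length))]
    subst harr
    have h1 : (ind.zip pos).map Prod.fst = ind := List.map_fst_zip (le_of_eq hlen)
    have h2 : (ind.zip pos).map (fun p => f p.2) = pos.map f := by
      rw [show (fun (p : Int × Nat) => f p.2) = f ∘ Prod.snd from rfl, ← List.map_map,
        List.map_snd_zip (le_of_eq hlen.symm)]
    rw [h1, h2]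

theorem pvSwapAdj_pairwise {α : Type} {R : α → α → Prop} (d : α) :
    ∀ (l : List α) (i : Nat), l.Pairwise R →
      (i + 1 < l.length → R (l.getD (i + 1) d) (l.getD i d)) →
      (pvSwapAdj l i).Pairwise R
  | [], i, hp, _ => by simp [pvSwapAdj]
  | [x], i, hp, _ => by cases i <;> simp [pvSwapAdj]
  | x :: y :: t, 0, hp, hr => by
      have hr' : R y x := by simpa [List.getD] using hr (by simp)
      rw [List.pairwise_cons] at hp
      obtain ⟨hx, hp2⟩ := hp
      rw [List.pairwise_cons] at hp2
      obtain ⟨hy, ht⟩ := hp2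
      simp only [pvSwapAdj]
      rw [List.pairwise_cons]
      refine ⟨?_, ?_⟩
      · intro b hb
        rcases List.mem_cons.mp hb with rfl | hb
        · exact hr'
        · exact hy b hb
      · rw [List.pairwise_cons]
        exact ⟨fun b hb => hx b (List.mem_cons_of_mem _ hb), ht⟩
  | x :: y :: t, n + 1, hp, hr => by
      rw [List.pairwise_cons] at hp
      obtain ⟨hx, ht⟩ := hp
      simp only [pvSwapAdj]
      rw [List.pairwise_cons]
      refine ⟨fun b hb => hx b ((pvSwapAdj_perm (y :: t) n).mem_iff.mp hb), ?_⟩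
      exact pvSwapAdj_pairwise d (y :: t) n ht
        (fun h' => by simpa [List.getD_cons_succ] using hr (by simpa using h'))

-- A's loop result is pairwise sorted in pvR
theorem pvLoopP_pairwise (ps : List (Int × Nat)) (index : Nat)
    (hchain : ∀ i, i + 1 ≤ index → i + 1 < ps.length →
      (ps.getD i (0,0)).1 ≤ (ps.getD (i + 1) (0,0)).1)
    (hstab : ps.Pairwise pvRst) :
    (pvLoopP ps index).Pairwise pvR := by
  fun_induction pvLoopP ps index with
  | case1 ps index h hgt ih =>
    apply ih
    · intro i hi; omega
    · refine pvSwapAdj_pairwise (0, 0) ps index hstab (fun _ heq => ?_)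
      rw [heq] at hgt; exact absurd hgt (lt_irrefl _)
  | case2 ps index h hgt ih =>
    apply ih
    · intro i hi hlt
      rcases Nat.lt_or_ge (i + 1) (index + 1) with hc | hc
      · exact hchain i (by omega) hlt
      · have : i = index := by omega
        subst this
        exact le_of_not_gt hgt
    · exact hstab
  | case3 ps index h =>
    have hadj : ∀ i (hi : i + 1 < ps.length), (ps[i]'(by omega)).1 ≤ (ps[i+1]'hi).1 := by
      intro i hi
      have := hchain i (by omega) hi
      rwa [List.getD_eq_getElem _ _ (by omega), List.getD_eq_getElem _ _ hi] at this
    have hmono : ∀ i j (hij : i ≤ j) (hj : j < ps.length), (ps[i]'(by omega)).1 ≤ (ps[j]'hj).1 := by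
      intro i j hij
      induction hij with
      | refl => intro hj; exact le_refl _
      | @step m hm ih =>
        intro hj
        exact le_trans (ih (by omega)) (hadj m hj)
    rw [List.pairwise_iff_getElem] at hstab ⊢
    intro i j hi hj hij
    have hle := hmono i j (le_of_lt hij) hj
    by_cases hc : (ps[i]'hi).1 < (ps[j]'hj).1
    · exact Or.inl hc
    · refine Or.inr ⟨le_antisymm hle (not_lt.mp hc), ?_⟩
      exact le_of_lt (hstab i j hi hj hij (le_antisymm hle (not_lt.mp hc)))

-- ===== B-side: stability of the insertion sort behind PySem.List.sorted on distinct positions =====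

def pvRN (k : Nat → Int) (a b : Nat) : Prop := k a < k b ∨ (k a = k b ∧ a ≤ b)

theorem pvInsertBy_stable (k : Nat → Int) (x : Nat) :
    ∀ (acc : List Nat), acc.Pairwise (pvRN k) → (∀ y ∈ acc, y < x) →
    (PySem.List.insertBy (fun a b => decide (k a < k b)) x acc).Pairwise (pvRN k)
  | [], _, _ => by simp [PySem.List.insertBy, pvRN]
  | y :: ys, hp, hlt => by
      rw [List.pairwise_cons] at hp
      obtain ⟨hy, hys⟩ := hp
      show (if (decide (k x < k y)) = true then x :: y :: ys
            else y :: PySem.List.insertBy (fun a b => decide (k a < k b)) x ys).Pairwise (pvRN k)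
      by_cases hxy : k x < k y
      · rw [if_pos (by simpa using hxy)]
        rw [List.pairwise_cons]
        refine ⟨?_, List.Pairwise.cons hy hys⟩
        intro b hb
        rcases List.mem_cons.mp hb with rfl | hb
        · exact Or.inl hxy
        · rcases hy b hb with h1 | h2
          · exact Or.inl (lt_trans hxy h1)
          · exact Or.inl (lt_of_lt_of_le hxy (le_of_eq h2.1))
      · rw [if_neg (by simpa using hxy)]
        rw [List.pairwise_cons]
        refine ⟨?_, pvInsertBy_stable k x ys hys (fun z hz => hlt z (List.mem_cons_of_mem _ hz))⟩
        intro b hb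
        rcases (PySem.List.mem_insertBy _ _ _ _).mp hb with rfl | hb
        · rcases lt_or_eq_of_le (not_lt.mp hxy) with h1 | h1
          · exact Or.inl h1
          · exact Or.inr ⟨h1, le_of_lt (hlt y (by simp))⟩
        · exact hy b hb

theorem pvFoldl_insertBy_stable (k : Nat → Int) :
    ∀ (xs acc : List Nat), xs.Pairwise (· < ·) → acc.Pairwise (pvRN k) →
    (∀ y ∈ acc, ∀ x ∈ xs, y < x) →
    (xs.foldl (fun acc x => PySem.List.insertBy (fun a b => decide (k a < k b)) x acc) acc).Pairwise (pvRN k)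
  | [], acc, _, hacc, _ => by simpa using hacc
  | x :: xs, acc, hxs, hacc, hcross => by
      rw [List.pairwise_cons] at hxs
      obtain ⟨hx, hxs'⟩ := hxs
      simp only [List.foldl_cons]
      apply pvFoldl_insertBy_stable k xs _ hxs'
      · exact pvInsertBy_stable k x acc hacc (fun y hy => hcross y hy x (by simp))
      · intro y hy z hz
        rcases (PySem.List.mem_insertBy _ _ _ _).mp hy with rfl | hy
        · exact hx z hz
        · exact hcross y hy z (List.mem_cons_of_mem _ hz)

theorem pvSorted_range_stable (n : Nat) (k : Nat → Int) :
    (PySem.List.sorted (List.range n) k false).Pairwise (pvRN k) := by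
  rw [PySem.List.sorted_eq_foldl_insertBy]
  exact pvFoldl_insertBy_stable k (List.range n) [] List.pairwise_lt_range (by simp) (by simp)

-- base list: indices zipped with their positions
theorem pvZip_range_eq (ind : List Int) (n : Nat) (h : ind.length = n) :
    ind.zip (List.range n) = (List.range n).map (fun i => (ind.getD i 0, i)) := by
  apply List.ext_getElem
  · simp [List.length_zip, h]
  · intro i h1 h2
    have hi : i < n := by simpa using h2
    rw [List.getElem_zip, List.getElem_map]
    simp [List.getElem_range, List.getElem?_eq_getElem (show i < ind.length by omega)]

theorem shuffle_string_spec : Claim_equal_shuffle_string := by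
  intro s indices _ hpre
  unfold Spec_shuffle_string shuffle_string shuffle_string_alt
  have hpre' : indices.length ≤ s.toList.length := hpre
  set n := indices.length with hn
  set l := s.toList with hl
  set k : Nat → Int := fun i => indices.getD i 0 with hk
  set g : Nat → Char := fun i => l.getD i ' ' with hg
  -- the first n characters of s are the positions mapped through g, the rest is the tail
  have hlg : l = (List.range n).map g ++ l.drop n := by
    conv_lhs => rw [← List.take_append_drop n l]
    congr 1
    apply List.ext_getElem
    · simp [hpre']
    · intro i h1 h2
      have hi : i < n := by simpa using h2
      simp [hg, List.getElem_range, List.getElem?_eq_getElem (show i < l.length by omega)]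
  -- bridge A's loop to the pair loop
  have hbridge := pvLoopA_eq g indices l 0 (List.range n) (l.drop n) hlg (by simp [hn])
  show String.ofList (pvLoopA indices l 0).2
      = String.ofList ((PySem.List.sorted (List.range n) k false).map (fun i => l.getD i ' ')
          ++ l.drop n)
  set P := pvLoopP (indices.zip (List.range n)) 0 with hP
  -- A's pair list is sorted in pvR and a permutation of the base
  have hPsort : P.Pairwise pvR := by
    apply pvLoopP_pairwise
    · intro i hi; omega
    · rw [pvZip_range_eq indices n hn.symm, List.pairwise_map]
      rw [List.pairwise_iff_getElem]
      intro i j hi hj hij _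
      simpa [List.getElem_range] using hij
  have hPperm : P.Perm (indices.zip (List.range n)) := pvLoopP_perm _ _
  -- B's pair list
  set order := PySem.List.sorted (List.range n) k false with horder
  set Q := order.map (fun i => (k i, i)) with hQ
  have hQsort : Q.Pairwise pvR := by
    rw [hQ, List.pairwise_map]
    have := pvSorted_range_stable n k
    refine this.imp ?_
    intro a b hab
    exact hab
  have hQperm : Q.Perm (indices.zip (List.range n)) := by
    rw [pvZip_range_eq indices n hn.symm, hQ]
    exact (PySem.List.sorted_perm (List.range n) k false).map _
  -- the two pair lists agree
  have hPQ : P = Q := by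
    apply List.Perm.eq_of_pairwise (le := pvR) ?_ hPsort hQsort (hPperm.trans hQperm.symm)
    intro a b _ _ hab hba
    rcases hab with h1 | h1 <;> rcases hba with h2 | h2
    · exact absurd (lt_trans h1 h2) (lt_irrefl _)
    · exact absurd h1 (by rw [h2.1]; exact lt_irrefl _)
    · exact absurd h2 (by rw [h1.1]; exact lt_irrefl _)
    · exact Prod.ext h1.1 (le_antisymm h1.2 h2.2)
  rw [hbridge, hPQ, hQ]
  simp only [List.map_map]
  rfl
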